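-- pv_equiv track=rewrite | github.com/vissesse/dev-loja | app_loja/normalizar.py | formatar_hora
-- ===== SOURCE A (Python) =====
-- def formatar_hora(hora):
--     new_hora = ''
--     i = 0
--     for h in hora:
--         if i == 2 or i == 4:
--             new_hora += ':'
--         new_hora += h
--         i += 1
--
--     return new_hora
-- ===== SOURCE B (Python) =====
-- def formatar_hora(hora):
--     res = hora[:2]
--     if len(hora) > 2:
--         res += ':' + hora[2:4]
--     if len(hora) > 4:
--         res += ':' + hora[4:]
--     return res
-- ===== Notes on version B (the rewrite author's own statement) =====
-- stated objective: simpler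
-- what changed: Replaces the char-by-char loop with an index counter by three guarded string slices (first two chars, next two, the rest) joined with colons.
import Mathlib
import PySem

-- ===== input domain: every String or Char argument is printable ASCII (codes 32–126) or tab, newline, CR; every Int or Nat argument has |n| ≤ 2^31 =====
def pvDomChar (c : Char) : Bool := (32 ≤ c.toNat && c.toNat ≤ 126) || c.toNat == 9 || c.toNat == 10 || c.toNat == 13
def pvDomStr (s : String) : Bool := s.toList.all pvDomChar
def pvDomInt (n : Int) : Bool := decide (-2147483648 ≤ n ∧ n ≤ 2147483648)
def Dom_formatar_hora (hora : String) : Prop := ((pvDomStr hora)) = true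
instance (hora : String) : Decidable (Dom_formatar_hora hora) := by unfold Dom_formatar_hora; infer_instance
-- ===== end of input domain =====

-- B replaces A's char-by-char loop with three guarded slices; objective: simpler.

-- ===== PORT A =====
-- A's loop: for each char, if the running index is 2 or 4 append ':', then append the char.
def pvLoopA (cs : List Char) (i : Nat) (acc : List Char) : List Char :=
  match cs with
  | [] => acc
  | h :: t => pvLoopA t (i + 1) (acc ++ (if i = 2 ∨ i = 4 then [':', h] else [h]))

def formatar_hora (hora : String) : String :=
  String.mk (pvLoopA hora.toList 0 [])

-- ===== PORT B =====
def formatar_hora_alt (hora : String) : String :=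
  let cs := hora.toList
  let res := PySem.List.slice cs none (some 2)
  let res := if cs.length > 2 then res ++ ':' :: PySem.List.slice cs (some 2) (some 4) else res
  let res := if cs.length > 4 then res ++ ':' :: PySem.List.slice cs (some 4) none else res
  String.mk res

-- ===== PRECONDITION & SPEC =====
def Spec_formatar_hora (hora : String) (out : String) : Prop := out = formatar_hora_alt hora
instance (hora : String) (out : String) : Decidable (Spec_formatar_hora hora out) := by unfold Spec_formatar_hora; infer_instance

-- ===== CLAIM (what is proved, stated in full; the proofs are below) =====
def Claim_equal_formatar_hora : Prop := ∀ (hora : String), Dom_formatar_hora hora → Spec_formatar_hora hora (formatar_hora hora)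

-- ===== LEMMAS AND PROOFS =====
-- Past index 4 the loop never inserts a colon: it just appends the rest.
theorem pvLoopA_ge5 (t : List Char) (i : Nat) (acc : List Char) (h : 5 ≤ i) :
    pvLoopA t i acc = acc ++ t := by
  induction t generalizing i acc with
  | nil => simp [pvLoopA]
  | cons c t ih =>
      have hc : ¬ (i = 2 ∨ i = 4) := by omega
      rw [pvLoopA, if_neg hc, ih _ _ (by omega)]; simp

theorem formatar_hora_eq (hora : String) : formatar_hora hora = formatar_hora_alt hora := by
  unfold formatar_hora formatar_hora_alt
  match hcs : hora.toList with
  | [] => simp [pvLoopA, PySem.List.slice]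
  | [a] => simp [pvLoopA, PySem.List.slice]
  | [a, b] => simp [pvLoopA, PySem.List.slice]
  | [a, b, c] => simp [pvLoopA, PySem.List.slice]
  | [a, b, c, d] => simp [pvLoopA, PySem.List.slice]
  | a :: b :: c :: d :: e :: t =>
      simp only [pvLoopA, pvLoopA_ge5 t 5 _ (by omega)]
      have h2 : PySem.List.slice (a :: b :: c :: d :: e :: t) none (some 2) = [a, b] := by
        rw [show (2 : Int) = ((2 : Nat) : Int) by norm_num, PySem.List.slice_to_natCast]; rfl
      have h24 : PySem.List.slice (a :: b :: c :: d :: e :: t) (some 2) (some 4) = [c, d] := by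
        rw [show (2 : Int) = ((2 : Nat) : Int) by norm_num,
            show (4 : Int) = ((4 : Nat) : Int) by norm_num, PySem.List.slice_natCast]; rfl
      have h4 : PySem.List.slice (a :: b :: c :: d :: e :: t) (some 4) none = e :: t := by
        rw [show (4 : Int) = ((4 : Nat) : Int) by norm_num, PySem.List.slice_from_natCast]; rfl
      simp [h2, h24, h4]

-- ===== VERDICT (by name: the statement is the Claim_ definition above) =====
theorem formatar_hora_spec : Claim_equal_formatar_hora := by
  intro hora _
  exact formatar_hora_eq hora
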